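-- pv_equiv track=rewrite | github.com/Shuniy/Codes | DeleteMiddleOfStack.py | deleteMiddleHelper
-- ===== SOURCE A (Python) =====
-- def deleteMiddleHelper(stack: list[int], middleElement: int) -> list[int]:
--     if len(stack) <= 0:
--         return stack
--
--     topElement = stack.pop()
--     if topElement == middleElement:
--         return stack
--     else:
--         result = deleteMiddleHelper(stack, middleElement)
--         result.append(topElement)
--         return result
-- ===== SOURCE B (Python) =====
-- def deleteMiddleHelper(stack: list[int], middleElement: int) -> list[int]:
--     temp = []
--     while stack:
--         top = stack.pop()
--         if top == middleElement:
--             break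
--         temp.append(top)
--     while temp:
--         stack.append(temp.pop())
--     return stack
-- ===== Notes on version B (the rewrite author's own statement) =====
-- stated objective: alternative
-- what changed: Replaced the recursive pop/recurse/re-append scheme by an iterative two-phase loop with an explicit temp stack: pop until the element is found, then push the saved elements back.
import Mathlib
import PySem

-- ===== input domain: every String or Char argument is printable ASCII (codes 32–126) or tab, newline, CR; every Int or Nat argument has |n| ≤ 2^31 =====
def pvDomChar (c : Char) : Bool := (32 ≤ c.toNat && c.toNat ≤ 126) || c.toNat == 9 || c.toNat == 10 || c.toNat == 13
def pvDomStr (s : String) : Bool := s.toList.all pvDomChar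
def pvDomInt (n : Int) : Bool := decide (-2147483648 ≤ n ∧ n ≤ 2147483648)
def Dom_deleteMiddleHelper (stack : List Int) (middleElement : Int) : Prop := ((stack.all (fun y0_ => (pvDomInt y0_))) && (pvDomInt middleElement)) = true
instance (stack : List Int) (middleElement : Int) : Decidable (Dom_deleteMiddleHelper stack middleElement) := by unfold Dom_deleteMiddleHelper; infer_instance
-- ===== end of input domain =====

-- B replaces A's recursion by an iterative two-phase temp-stack loop; same return value
-- (both Pythons mutate `stack` in place; the equivalence proved here is about the return value).

-- ===== PORT A =====
-- recursive: pop the top; if it is the element stop, else recurse and re-append the top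
def deleteMiddleHelper (stack : List Int) (middleElement : Int) : List Int :=
  if _h : stack.length ≤ 0 then stack
  else
    let topElement := stack.getLast (by cases stack with | nil => simp at _h | cons a l => simp)
    let rest := stack.dropLast
    if topElement = middleElement then rest
    else deleteMiddleHelper rest middleElement ++ [topElement]
termination_by stack.length
decreasing_by
  cases stack with
  | nil => simp at _h
  | cons a l => simp [List.length_dropLast]

-- ===== PORT B =====
-- phase 1: `while stack: top = stack.pop(); if top == middleElement: break; temp.append(top)`
-- ported over the reversed list (pop = take the head of the reversal); temp is kept with its
-- most recently appended element first (append = cons, temp.pop = take the head).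
def pvPhase1 (revStack : List Int) (middleElement : Int) (temp : List Int) :
    List Int × List Int :=
  match revStack with
  | [] => ([], temp)
  | top :: rest =>
    if top = middleElement then (rest, temp)
    else pvPhase1 rest middleElement (top :: temp)

-- phase 2: `while temp: stack.append(temp.pop())`
def pvPhase2 (stack : List Int) (temp : List Int) : List Int :=
  match temp with
  | [] => stack
  | t :: rest => pvPhase2 (stack ++ [t]) rest

def deleteMiddleHelper_alt (stack : List Int) (middleElement : Int) : List Int :=
  let p := pvPhase1 stack.reverse middleElement []
  pvPhase2 p.1.reverse p.2

-- ===== PRECONDITION & SPEC =====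
def Spec_deleteMiddleHelper (stack : List Int) (middleElement : Int) (out : List Int) : Prop := out = deleteMiddleHelper_alt stack middleElement
instance (stack : List Int) (middleElement : Int) (out : List Int) : Decidable (Spec_deleteMiddleHelper stack middleElement out) := by unfold Spec_deleteMiddleHelper; infer_instance

-- ===== CLAIM (what is proved, stated in full; the proofs are below) =====
def Claim_equal_deleteMiddleHelper : Prop := ∀ (stack : List Int) (middleElement : Int), Dom_deleteMiddleHelper stack middleElement → Spec_deleteMiddleHelper stack middleElement (deleteMiddleHelper stack middleElement)

-- ===== LEMMAS AND PROOFS =====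

theorem deleteMiddleHelper_nil (m : Int) : deleteMiddleHelper [] m = [] := by
  simp [deleteMiddleHelper]

theorem deleteMiddleHelper_concat (l : List Int) (t m : Int) :
    deleteMiddleHelper (l ++ [t]) m =
      if t = m then l else deleteMiddleHelper l m ++ [t] := by
  rw [deleteMiddleHelper]
  simp

theorem pvPhase2_eq (stack temp : List Int) : pvPhase2 stack temp = stack ++ temp := by
  induction temp generalizing stack with
  | nil => simp [pvPhase2]
  | cons t rest ih => simp [pvPhase2, ih]

theorem pvPhase1_spec (r : List Int) (m : Int) (temp : List Int) :
    (pvPhase1 r m temp).1.reverse ++ (pvPhase1 r m temp).2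
      = deleteMiddleHelper r.reverse m ++ temp := by
  induction r generalizing temp with
  | nil => simp [pvPhase1, deleteMiddleHelper_nil]
  | cons t rest ih =>
    by_cases h : t = m
    · simp [pvPhase1, h, deleteMiddleHelper_concat]
    · simp [pvPhase1, h, ih, deleteMiddleHelper_concat]

-- ===== VERDICT (by name: the statement is the Claim_ definition above) =====
theorem deleteMiddleHelper_spec : Claim_equal_deleteMiddleHelper := by
  intro stack m _
  unfold Spec_deleteMiddleHelper deleteMiddleHelper_alt
  rw [pvPhase2_eq, pvPhase1_spec]
  simp
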